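-- pv_equiv track=rewrite | github.com/RuiZhangHIT/HIT_NLP_lab | lab1/code/stage_5.py | gene_dag
-- ===== SOURCE A (Python) =====
-- def gene_dag(line, uni_dic):
--     dag = {}  # 用于保存最终的有向无环图DAG
--     length = len(line)
--     for start in range(length):  # 遍历句子中的每一个字，判断其分词情况
--         end = start
--         dag[start] = []  # 处于第k个位置上的字所能构成词的结束下标
--         seg_word = line[start: end + 1]
--         while seg_word in uni_dic:
--             if uni_dic[seg_word] > 0:  # 从k位置开始的词在词典中且词频>0
--                 dag[start].append(end)  # 将对应的结束下标加入到DAG中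
--             end += 1
--             if end == length:
--                 break
--             seg_word = line[start: end + 1]
--         if not dag[start]:
--             dag[start].append(start)  # 未找到词则将单字词加入DAG
--     return dag
-- ===== SOURCE B (Python) =====
-- def gene_dag(line, uni_dic):
--     # Trie-based re-implementation: build a prefix trie of the dictionary once,
--     # then walk it character by character instead of slicing substrings.
--     root = {}
--     for word, freq in uni_dic.items():
--         node = root
--         for ch in word:
--             node = node.setdefault(ch, {})
--         node.setdefault(None, freq)
--     dag = {}
--     n = len(line)
--     for start in range(n):
--         ends = []
--         node = root
--         end = start
--         while end < n:
--             node = node.get(line[end])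
--             if node is None or None not in node:
--                 break
--             if node[None] > 0:
--                 ends.append(end)
--             end += 1
--         if not ends:
--             ends.append(start)
--         dag[start] = ends
--     return dag
-- ===== Notes on version B (the rewrite author's own statement) =====
-- stated objective: alternative
-- what changed: B builds a prefix trie of the dictionary once (marker node = exact key with its frequency) and walks it one character per step from each start position, instead of A's re-slicing line[start:end+1] and doing a fresh dict membership + lookup for every end position.
import Mathlib
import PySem

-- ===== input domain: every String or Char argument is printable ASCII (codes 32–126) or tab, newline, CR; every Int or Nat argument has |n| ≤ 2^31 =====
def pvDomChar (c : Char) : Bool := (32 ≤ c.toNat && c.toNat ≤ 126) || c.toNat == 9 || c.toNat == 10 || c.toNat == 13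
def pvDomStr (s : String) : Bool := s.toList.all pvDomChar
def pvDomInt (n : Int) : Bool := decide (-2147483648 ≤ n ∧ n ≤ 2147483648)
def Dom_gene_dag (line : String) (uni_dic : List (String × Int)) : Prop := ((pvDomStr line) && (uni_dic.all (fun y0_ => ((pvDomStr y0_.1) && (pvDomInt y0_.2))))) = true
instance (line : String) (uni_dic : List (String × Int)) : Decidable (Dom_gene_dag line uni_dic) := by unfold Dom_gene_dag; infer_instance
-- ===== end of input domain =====

-- B replaces A's repeated substring slicing + dict membership per end-position by a
-- dictionary trie built once and walked character by character (objective: alternative).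

-- ===== PORT A =====
-- the `while seg_word in uni_dic: …` loop of A, for one fixed `start`
def aWhile (line : String) (d : PySem.Dict String Int) (n start : Nat)
    (e : Nat) (he : e < n) (acc : List Int) : List Int :=
  let seg := PySem.Str.slice line (some (start : Int)) (some ((e : Int) + 1))
  if d.contains seg then
    let acc' := if d.getD seg 0 > 0 then acc ++ [(e : Int)] else acc
    if _h : e + 1 = n then acc'                    -- `if end == length: break`
    else aWhile line d n start (e + 1) (by omega) acc'
  else acc
termination_by n - e

def gene_dag (line : String) (uni_dic : List (String × Int)) : List (Int × List Int) :=
  let d := PySem.Dict.mk uni_dic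
  let n := line.toList.length
  (List.range n).foldl (fun dag start =>
    -- `start < n` always holds inside `range(length)`: the dite only makes the call total
    let ends := if h : start < n then aWhile line d n start start h [] else []
    let ends := if ends = [] then [(start : Int)] else ends
    dag ++ [((start : Int), ends)]) []

-- ===== PORT B =====
-- trie node: optional stored frequency (the `None` marker key) plus children (mutual pair,
-- since a nested `List (Char × PTrie)` is not allowed)
mutual
inductive PTrie where
  | node : Option Int → PTrieCs → PTrie
inductive PTrieCs where
  | nil : PTrieCs
  | cons : Char → PTrie → PTrieCs → PTrieCs
end

def PTrie.marker : PTrie → Option Int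
  | .node m _ => m

def PTrie.children : PTrie → PTrieCs
  | .node _ cs => cs

-- children lookup: `node.get(ch)`
def trieChild : PTrieCs → Char → Option PTrie
  | .nil, _ => none
  | .cons c t rest, ch => if c = ch then some t else trieChild rest ch

-- functional update of one child (the in-place mutation of Source B's child dict)
def trieSetChild : PTrieCs → Char → PTrie → PTrieCs
  | .nil, ch, u => .cons ch u .nil
  | .cons c t rest, ch, u =>
      if c = ch then .cons c u rest else .cons c t (trieSetChild rest ch u)

-- insert one dictionary word: walk/extend the path (`setdefault(ch, {})`),
-- then set the marker if absent (`setdefault(None, freq)`)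
def trieInsert : PTrie → List Char → Int → PTrie
  | .node m cs, [], v => .node (some (m.getD v)) cs
  | .node m cs, c :: w, v =>
      .node m (trieSetChild cs c
        (trieInsert ((trieChild cs c).getD (.node none .nil)) w v))

-- the `while end < n: …` walk of Source B, for one fixed `start`
def trieWalk (cs : List Char) (t : PTrie) (e : Nat) (acc : List Int) : List Int :=
  if h : e < cs.length then
    match trieChild t.children cs[e] with
    | none => acc
    | some t' =>
      match t'.marker with
      | none => acc
      | some f => trieWalk cs t' (e + 1) (if f > 0 then acc ++ [(e : Int)] else acc)
  else acc
termination_by cs.length - e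

def gene_dag_alt (line : String) (uni_dic : List (String × Int)) : List (Int × List Int) :=
  let root := uni_dic.foldl (fun t p => trieInsert t p.1.toList p.2) (PTrie.node none .nil)
  let cs := line.toList
  let n := cs.length
  (List.range n).foldl (fun dag start =>
    let ends := trieWalk cs root start []
    let ends := if ends = [] then [(start : Int)] else ends
    dag ++ [((start : Int), ends)]) []

-- ===== PRECONDITION & SPEC =====
def Spec_gene_dag (line : String) (uni_dic : List (String × Int)) (out : List (Int × List Int)) : Prop := out = gene_dag_alt line uni_dic
instance (line : String) (uni_dic : List (String × Int)) (out : List (Int × List Int)) : Decidable (Spec_gene_dag line uni_dic out) := by unfold Spec_gene_dag; infer_instance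

-- ===== CLAIM (what is proved, stated in full; the proofs are below) =====
def Claim_equal_gene_dag : Prop := ∀ (line : String) (uni_dic : List (String × Int)), Dom_gene_dag line uni_dic → Spec_gene_dag line uni_dic (gene_dag line uni_dic)

-- ===== LEMMAS AND PROOFS =====

-- descend the trie along a list of characters
def trieFind : PTrie → List Char → Option PTrie
  | t, [] => some t
  | t, c :: w =>
      match trieChild t.children c with
      | none => none
      | some u => trieFind u w

-- the marker found at the end of a path = `uni_dic` membership/value of that word
def trieLookup (t : PTrie) (w : List Char) : Option Int := (trieFind t w).bind PTrie.marker

theorem trieLookup_nil (t : PTrie) : trieLookup t [] = t.marker := by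
  simp [trieLookup, trieFind]

theorem trieLookup_cons (t : PTrie) (c : Char) (w : List Char) :
    trieLookup t (c :: w) =
      match trieChild t.children c with
      | none => none
      | some u => trieLookup u w := by
  simp only [trieLookup, trieFind]
  cases trieChild t.children c <;> simp

theorem trieLookup_empty (w : List Char) : trieLookup (.node none .nil) w = none := by
  cases w <;> simp [trieLookup, trieFind, trieChild, PTrie.children, PTrie.marker]

theorem trieChild_setChild (cs : PTrieCs) (c c' : Char) (u : PTrie) :
    trieChild (trieSetChild cs c u) c' = if c' = c then some u else trieChild cs c' := by
  cases cs with
  | nil =>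
      show (if c = c' then some u else trieChild .nil c') = _
      by_cases h : c' = c
      · rw [if_pos h.symm, if_pos h]
      · rw [if_neg (fun hh => h hh.symm), if_neg h]
  | cons c0 t0 rest =>
      show trieChild (if c0 = c then .cons c0 u rest
            else .cons c0 t0 (trieSetChild rest c u)) c' = _
      by_cases h1 : c0 = c
      · rw [if_pos h1]
        show (if c0 = c' then some u else trieChild rest c')
          = (if c' = c then some u else trieChild (.cons c0 t0 rest) c')
        show _ = (if c' = c then some u else if c0 = c' then some t0 else trieChild rest c')
        by_cases h2 : c0 = c' <;> by_cases h3 : c' = c <;> simp_all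
      · rw [if_neg h1]
        show (if c0 = c' then some t0 else trieChild (trieSetChild rest c u) c')
          = (if c' = c then some u else trieChild (.cons c0 t0 rest) c')
        show _ = (if c' = c then some u else if c0 = c' then some t0 else trieChild rest c')
        rw [trieChild_setChild rest c c' u]
        by_cases h2 : c0 = c' <;> by_cases h3 : c' = c <;> simp_all
termination_by sizeOf cs

theorem trieLookup_insert (k : List Char) (t : PTrie) (v : Int) (w : List Char) :
    trieLookup (trieInsert t k v) w =
      if w = k then some ((trieLookup t k).getD v) else trieLookup t w := by
  induction k generalizing t w with
  | nil =>
      obtain ⟨m, cs⟩ := t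
      rw [show trieInsert (PTrie.node m cs) [] v = PTrie.node (some (m.getD v)) cs from rfl]
      cases w with
      | nil => simp [trieLookup_nil, PTrie.marker]
      | cons c w' => simp [trieLookup_cons, PTrie.children]
  | cons c k' ih =>
      obtain ⟨m, cs⟩ := t
      rw [show trieInsert (PTrie.node m cs) (c :: k') v
            = PTrie.node m (trieSetChild cs c
                (trieInsert ((trieChild cs c).getD (.node none .nil)) k' v)) from rfl]
      cases w with
      | nil => simp [trieLookup_nil, PTrie.marker]
      | cons c'' w' =>
          simp only [trieLookup_cons, PTrie.children, trieChild_setChild]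
          by_cases hc : c'' = c
          · subst hc
            cases hch : trieChild cs c'' with
            | none =>
                simp only [Option.getD_none, List.cons.injEq, true_and]
                show trieLookup (trieInsert (PTrie.node none PTrieCs.nil) k' v) w' = _
                rw [ih]
                split_ifs <;> simp [trieLookup_empty]
            | some tc =>
                simp only [Option.getD_some, List.cons.injEq, true_and]
                show trieLookup (trieInsert tc k' v) w' = _
                exact ih tc w'
          · rw [if_neg hc, if_neg (fun h => hc (List.cons.inj h).1)]

-- first-match association-list lookup on the character level
def myLook : List (String × Int) → List Char → Option Int
  | [], _ => none
  | (k, v) :: rest, w => if k.toList = w then some v else myLook rest w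

theorem get?_mk_eq_myLook (d : List (String × Int)) (w : List Char) :
    (PySem.Dict.mk d).get? (String.ofList w) = myLook d w := by
  induction d with
  | nil => simp [PySem.Dict.get?, myLook]
  | cons p rest ih =>
      obtain ⟨k, v⟩ := p
      rw [PySem.Dict.get?_mk_cons]
      simp only [myLook]
      have : (k == String.ofList w) = decide (k.toList = w) := by
        rw [Bool.beq_eq_decide_eq]
        by_cases h : k.toList = w
        · rw [← h, String.ofList_toList]
          simp
        · simp [h]
          intro hk
          exact h (by rw [hk, String.toList_ofList])
      rw [this]
      split_ifs with h <;> simp_all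

theorem trieLookup_foldl (d : List (String × Int)) (t : PTrie) (w : List Char) :
    trieLookup (d.foldl (fun t p => trieInsert t p.1.toList p.2) t) w
      = (trieLookup t w).or (myLook d w) := by
  induction d generalizing t with
  | nil => simp [myLook]
  | cons p rest ih =>
      obtain ⟨k, v⟩ := p
      simp only [List.foldl_cons, ih, trieLookup_insert, myLook]
      by_cases hw : w = k.toList
      · subst hw
        cases trieLookup t k.toList <;> simp
      · rw [if_neg hw, if_neg (Ne.symm hw)]

theorem trieLookup_root (uni_dic : List (String × Int)) (w : List Char) :
    trieLookup (uni_dic.foldl (fun t p => trieInsert t p.1.toList p.2) (PTrie.node none .nil)) w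
      = (PySem.Dict.mk uni_dic).get? (String.ofList w) := by
  rw [trieLookup_foldl, trieLookup_empty, get?_mk_eq_myLook]
  simp

theorem trieFind_append (t : PTrie) (w : List Char) (c : Char) :
    trieFind t (w ++ [c]) = (trieFind t w).bind (fun u => trieChild u.children c) := by
  induction w generalizing t with
  | nil =>
      simp only [List.nil_append, trieFind]
      cases h : trieChild t.children c <;> simp [h]
  | cons c0 w' ih =>
      simp only [List.cons_append, trieFind]
      cases trieChild t.children c0 <;> simp [ih]

-- the prefix of `line` that A's `seg_word = line[start:end+1]` denotes
theorem seg_toList (line : String) (start e : Nat) :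
    (PySem.Str.slice line (some (start : Int)) (some ((e : Int) + 1))).toList
      = ((line.toList.drop start).take (e + 1 - start)) := by
  rw [PySem.Str.toList_slice]
  have : ((e : Int) + 1) = ((e + 1 : Nat) : Int) := by push_cast; ring
  rw [this]
  exact PySem.List.slice_natCast line.toList start (e + 1)

theorem take_succ_drop (cs : List Char) (start e : Nat) (hse : start ≤ e) (he : e < cs.length) :
    (cs.drop start).take (e + 1 - start) = (cs.drop start).take (e - start) ++ [cs[e]] := by
  have h1 : e + 1 - start = (e - start) + 1 := by omega
  rw [h1, List.take_add_one]
  have h2 : (cs.drop start)[e - start]? = some cs[e] := by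
    rw [List.getElem?_drop]
    have : start + (e - start) = e := by omega
    rw [this, List.getElem?_eq_getElem he]
  simp [h2]

-- aWhile = trieWalk, given the invariant that `t` is the node reached along line[start:e]
theorem walk_eq (line : String) (uni_dic : List (String × Int))
    (n start : Nat) (hn : n = line.toList.length)
    (e : Nat) (he : e < n) (hse : start ≤ e) (t : PTrie)
    (ht : trieFind (uni_dic.foldl (fun t p => trieInsert t p.1.toList p.2) (PTrie.node none .nil))
            ((line.toList.drop start).take (e - start)) = some t)
    (acc : List Int) :
    aWhile line (PySem.Dict.mk uni_dic) n start e he acc = trieWalk line.toList t e acc := by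
  have hlt : e < line.toList.length := hn ▸ he
  have hstep : trieFind (uni_dic.foldl (fun t p => trieInsert t p.1.toList p.2) (PTrie.node none .nil))
      ((line.toList.drop start).take (e + 1 - start)) = trieChild t.children line.toList[e] := by
    rw [take_succ_drop line.toList start e hse hlt, trieFind_append, ht, Option.bind_some]
  have hsegeq : PySem.Str.slice line (some (start : Int)) (some ((e : Int) + 1))
      = String.ofList ((line.toList.drop start).take (e + 1 - start)) := by
    rw [← seg_toList line start e, String.ofList_toList]
  have hget : (PySem.Dict.mk uni_dic).get?
      (PySem.Str.slice line (some (start : Int)) (some ((e : Int) + 1)))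
      = (trieChild t.children line.toList[e]).bind PTrie.marker := by
    rw [hsegeq, ← trieLookup_root, trieLookup, hstep]
  rw [aWhile, trieWalk, dif_pos hlt]
  cases hch : trieChild t.children line.toList[e] with
  | none =>
      rw [hch, Option.bind_none] at hget
      rw [if_neg (by rw [PySem.Dict.contains_eq_isSome_get?, hget]; simp)]
  | some t' =>
      rw [hch, Option.bind_some] at hget
      cases hm : t'.marker with
      | none =>
          rw [hm] at hget
          rw [if_neg (by rw [PySem.Dict.contains_eq_isSome_get?, hget]; simp)]
          simp [hm]
      | some f =>
          rw [hm] at hget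
          rw [if_pos (by rw [PySem.Dict.contains_eq_isSome_get?, hget]; simp)]
          simp only [hm]
          have hgetD : (PySem.Dict.mk uni_dic).getD
              (PySem.Str.slice line (some (start : Int)) (some ((e : Int) + 1))) 0 = f := by
            rw [PySem.Dict.getD_eq_get?_getD, hget]; rfl
          simp only [hgetD]
          by_cases hend : e + 1 = n
          · rw [dif_pos hend, trieWalk, dif_neg (by omega)]
          · rw [dif_neg hend]
            exact walk_eq line uni_dic n start hn (e + 1) (by omega) (by omega) t'
              (by rw [hstep, hch]) _
termination_by n - e

-- ===== VERDICT (by name: the statement is the Claim_ definition above) =====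
theorem gene_dag_spec : Claim_equal_gene_dag := by
  intro line uni_dic _
  unfold Spec_gene_dag gene_dag gene_dag_alt
  simp only []
  apply PySem.List.foldl_congr_mem
  intro dag start hstart
  have hlt : start < line.toList.length := List.mem_range.mp hstart
  rw [dif_pos hlt]
  rw [walk_eq line uni_dic line.toList.length start rfl start hlt le_rfl
        (uni_dic.foldl (fun t p => trieInsert t p.1.toList p.2) (PTrie.node none .nil))
        (by simp [trieFind]) []]
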